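-- pv_equiv track=rewrite | github.com/desiro/vRNAsite | vRNAsite.py | intraStructure
-- ===== SOURCE A (Python) =====
-- def intraStructure(RNA, pattern):
--     ## searches for intra structure folds
--     pattern = pattern[:len(RNA.split("&")[0])]+"&"+pattern[len(RNA.split("&")[0]):]
--     aSeq = True
--     for i in pattern:
--         if   i == "(" and     aSeq: pass
--         elif i == "(" and not aSeq: return True
--         elif i == ")" and     aSeq: return True
--         elif i == ")" and not aSeq: pass
--         elif i == "&": aSeq = False
--     return False
-- ===== SOURCE B (Python) =====
-- def intraStructure(RNA, pattern):
--     ## intra fold: a ")" on the first strand's part of the pattern or a "(" on the second's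
--     split = len(RNA.split("&")[0])
--     return ")" in pattern[:split] or "(" in pattern[split:]
-- ===== Notes on version B (the rewrite author's own statement) =====
-- stated objective: simpler
-- what changed: Replaces the inserted-'&' string surgery and the aSeq state-machine loop with two slices at the strand split point and two membership tests (C-level substring scans instead of a branchy per-character Python loop).
-- outside the precondition, e.g. on intraStructure('AA&CC', '&(...'): A returns True, B returns False
import Mathlib
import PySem

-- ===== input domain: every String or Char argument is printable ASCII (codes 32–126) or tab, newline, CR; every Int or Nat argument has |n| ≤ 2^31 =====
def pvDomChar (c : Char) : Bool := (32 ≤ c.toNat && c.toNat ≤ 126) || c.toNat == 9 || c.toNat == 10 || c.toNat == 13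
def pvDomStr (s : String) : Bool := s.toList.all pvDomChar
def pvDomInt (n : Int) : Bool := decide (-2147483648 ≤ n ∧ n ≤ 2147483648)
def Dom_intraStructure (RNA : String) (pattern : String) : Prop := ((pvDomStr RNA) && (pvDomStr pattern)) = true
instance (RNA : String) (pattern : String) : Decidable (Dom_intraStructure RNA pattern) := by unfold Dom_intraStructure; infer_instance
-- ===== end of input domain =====

-- B drops A's inserted-"&" trick and the aSeq state-machine loop: it slices the pattern at the
-- strand split point and uses two membership tests (objective: simpler).

-- ===== PORT A =====
-- the for-loop over the characters of the '&'-augmented pattern, carrying the aSeq flag;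
-- branches in A's order, early returns become results
def pvLoopA : List Char → Bool → Bool
  | [], _ => false
  | c :: rest, aSeq =>
    if c = '(' ∧ aSeq then pvLoopA rest aSeq
    else if c = '(' ∧ ¬ aSeq then true
    else if c = ')' ∧ aSeq then true
    else if c = ')' ∧ ¬ aSeq then pvLoopA rest aSeq
    else if c = '&' then pvLoopA rest false
    else pvLoopA rest aSeq

def intraStructure (RNA : String) (pattern : String) : Bool :=
  -- len(RNA.split("&")[0]); split("&") always returns a nonempty list, so [0] is its head
  let split := ((PySem.Chars.splitOn RNA.toList ['&']).headD []).length
  -- pattern = pattern[:split] + "&" + pattern[split:]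
  let pattern' := PySem.List.slice pattern.toList none (some (split : Int))
                  ++ ['&']
                  ++ PySem.List.slice pattern.toList (some (split : Int)) none
  pvLoopA pattern' true

-- ===== PORT B =====
def intraStructure_alt (RNA : String) (pattern : String) : Bool :=
  let split := ((PySem.Chars.splitOn RNA.toList ['&']).headD []).length
  PySem.Chars.isIn [')'] (PySem.List.slice pattern.toList none (some (split : Int)))
    || PySem.Chars.isIn ['('] (PySem.List.slice pattern.toList (some (split : Int)) none)

-- ===== PRECONDITION & SPEC =====
-- Pre_ excludes patterns with a "&" inside their first-strand part (the first len(RNA.split("&")[0])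
-- characters): there the strand separator is duplicated inside the structure string and A's state
-- flip at that premature "&" makes the effective split point an accident of the malformed input;
-- B always splits at the RNA's "&".
def Pre_intraStructure (RNA : String) (pattern : String) : Prop :=
  '&' ∉ pattern.toList.take ((PySem.Chars.splitOn RNA.toList ['&']).headD []).length
instance (RNA : String) (pattern : String) : Decidable (Pre_intraStructure RNA pattern) := by unfold Pre_intraStructure; infer_instance

def pvWitness_intraStructure : String × String := ("AA&CC", "((.((")

def Spec_intraStructure (RNA : String) (pattern : String) (out : Bool) : Prop := out = intraStructure_alt RNA pattern
instance (RNA : String) (pattern : String) (out : Bool) : Decidable (Spec_intraStructure RNA pattern out) := by unfold Spec_intraStructure; infer_instance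

-- ===== CLAIM (what is proved, stated in full; the proofs are below) =====
def Claim_equal_intraStructure : Prop := ∀ (RNA : String) (pattern : String), Dom_intraStructure RNA pattern → Pre_intraStructure RNA pattern → Spec_intraStructure RNA pattern (intraStructure RNA pattern)

-- ===== LEMMAS AND PROOFS =====

-- once aSeq is False it stays False, and the loop returns true exactly on a '('
theorem pvLoopA_false (l : List Char) : pvLoopA l false = l.contains '(' := by
  induction l with
  | nil => rfl
  | cons c rest ih =>
    by_cases h : c = '('
    · simp [pvLoopA, h]
    · by_cases h2 : c = ')' <;> by_cases h3 : c = '&' <;>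
        simp [pvLoopA, h, h2, h3, Ne.symm h, ih]

-- on an '&'-free prefix the loop in state True returns true exactly on a ')',
-- else falls through the separator into state False
theorem pvLoopA_true (l1 l2 : List Char) (h : '&' ∉ l1) :
    pvLoopA (l1 ++ '&' :: l2) true = (l1.contains ')' || pvLoopA l2 false) := by
  induction l1 with
  | nil => simp [pvLoopA]
  | cons c rest ih =>
    have hc : c ≠ '&' := by intro hc; exact h (by simp [hc])
    have hrest : '&' ∉ rest := fun hm => h (List.mem_cons_of_mem _ hm)
    by_cases h1 : c = '(' <;> by_cases h2 : c = ')' <;>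
      simp [pvLoopA, h1, h2, hc, eq_comm, ih hrest]

theorem isIn_singleton_eq_contains (a : Char) (l : List Char) :
    PySem.Chars.isIn [a] l = l.contains a := by
  rcases Bool.eq_false_or_eq_true (l.contains a) with hb | hb <;> rw [hb]
  · rw [PySem.Chars.isIn_iff_infix, List.singleton_infix_iff]
    simpa using hb
  · rw [PySem.Chars.isIn_eq_false_iff, List.singleton_infix_iff]
    simpa using hb

theorem intraStructure_spec' (RNA pattern : String)
    (hpre : Pre_intraStructure RNA pattern) :
    intraStructure RNA pattern = intraStructure_alt RNA pattern := by
  unfold intraStructure intraStructure_alt Pre_intraStructure at *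
  dsimp only
  set n := ((PySem.Chars.splitOn RNA.toList ['&']).headD []).length with hn
  rw [PySem.List.slice_to_natCast pattern.toList n,
      PySem.List.slice_from_natCast pattern.toList n]
  have hnf : '&' ∉ pattern.toList.take n := hpre
  rw [show pattern.toList.take n ++ ['&'] ++ pattern.toList.drop n
        = pattern.toList.take n ++ '&' :: pattern.toList.drop n by simp,
      pvLoopA_true _ _ hnf, pvLoopA_false,
      isIn_singleton_eq_contains, isIn_singleton_eq_contains]

-- ===== VERDICT (by name: the statement is the Claim_ definition above) =====
theorem intraStructure_spec : Claim_equal_intraStructure := by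
  intro RNA pattern _ hpre
  exact intraStructure_spec' RNA pattern hpre
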